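-- pv_equiv track=rewrite | github.com/GredInLabsTechnologies/Gred-in-Multiagent-Orchestrator | tools/gimo_server/security/access_control.py | _is_operator_allowed_path
-- ===== SOURCE A (Python) =====
-- READ_ONLY_ACTIONS_PATHS = {
--     "/status",
--     "/health",
--     "/health/deep",
--     "/ops/files/content",
--     "/ops/files/tree",
--     "/ops/files/search",
--     "/ops/files/diff",
--     "/ops/repos",
--     "/ops/repos/active",
--     "/ops/repos/select",
--     "/ops/plan",
--     "/ops/drafts",
--     "/ops/approved",
--     "/ops/runs",
--     "/ops/config",
-- }
--
-- OPERATOR_EXTRA_PREFIXES = (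
--     "/ops/",
-- )
--
-- OPERATOR_EMERGENCY_PATHS = {
--     "/ops/security/events",
--     "/ops/security/resolve",
--     "/ops/repos/revoke",
--     "/ops/audit/tail",
-- }
--
-- def _is_actions_allowed_path(path: str) -> bool:
--     if path in READ_ONLY_ACTIONS_PATHS:
--         return True
--     if path.startswith("/ops/drafts/"):
--         return True
--     if path.startswith("/ops/approved/"):
--         return True
--     if path.startswith("/ops/runs/"):
--         return True
--     return False
--
-- def _is_operator_allowed_path(path: str) -> bool:
--     if _is_actions_allowed_path(path):
--         return True
--     if path in OPERATOR_EMERGENCY_PATHS: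
--         return True
--     for prefix in OPERATOR_EXTRA_PREFIXES:
--         if path.startswith(prefix):
--             return True
--     return False
-- ===== SOURCE B (Python) =====
-- def _is_operator_allowed_path(path: str) -> bool:
--     return path in ("/status", "/health", "/health/deep") or path.startswith("/ops/")
-- ===== Notes on version B (the rewrite author's own statement) =====
-- stated objective: simpler
-- what changed: B replaces the helper function, the two membership sets and the loop over extra prefixes with a single closed boolean: membership in the three non-ops paths or the one operator-prefix test, which subsumes every other allowed case.
import Mathlib
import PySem

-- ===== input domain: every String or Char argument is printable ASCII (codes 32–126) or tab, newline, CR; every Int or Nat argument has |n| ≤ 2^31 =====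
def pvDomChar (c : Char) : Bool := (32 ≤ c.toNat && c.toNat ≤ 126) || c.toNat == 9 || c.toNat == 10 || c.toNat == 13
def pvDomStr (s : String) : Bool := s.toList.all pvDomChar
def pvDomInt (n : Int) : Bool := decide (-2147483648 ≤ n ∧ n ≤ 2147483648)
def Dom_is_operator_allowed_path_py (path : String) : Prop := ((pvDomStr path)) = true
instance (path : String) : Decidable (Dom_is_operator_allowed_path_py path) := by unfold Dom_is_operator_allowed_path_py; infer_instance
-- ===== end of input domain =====

-- B collapses A's helper, two membership sets and prefix loop into one closed boolean
-- (three non-/ops paths or startswith "/ops/"): simpler, same behaviour.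


-- ===== PORT A =====
def READ_ONLY_ACTIONS_PATHS : List String :=
  ["/status", "/health", "/health/deep", "/ops/files/content", "/ops/files/tree",
   "/ops/files/search", "/ops/files/diff", "/ops/repos", "/ops/repos/active",
   "/ops/repos/select", "/ops/plan", "/ops/drafts", "/ops/approved", "/ops/runs",
   "/ops/config"]

def OPERATOR_EXTRA_PREFIXES : List String := ["/ops/"]

def OPERATOR_EMERGENCY_PATHS : List String :=
  ["/ops/security/events", "/ops/security/resolve", "/ops/repos/revoke", "/ops/audit/tail"]

def is_actions_allowed_path_py (path : String) : Bool :=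
  if READ_ONLY_ACTIONS_PATHS.contains path then true
  else if PySem.Str.startswith path "/ops/drafts/" then true
  else if PySem.Str.startswith path "/ops/approved/" then true
  else if PySem.Str.startswith path "/ops/runs/" then true
  else false

def is_operator_allowed_path_py (path : String) : Bool :=
  if is_actions_allowed_path_py path then true
  else if OPERATOR_EMERGENCY_PATHS.contains path then true
  -- the 'for prefix in OPERATOR_EXTRA_PREFIXES: if path.startswith(prefix): return True' loop:
  else if OPERATOR_EXTRA_PREFIXES.any (fun p => PySem.Str.startswith path p) then true
  else false

-- ===== PORT B =====
def is_operator_allowed_path_py_alt (path : String) : Bool :=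
  (path == "/status" || path == "/health" || path == "/health/deep")
    || PySem.Str.startswith path "/ops/"

-- ===== PRECONDITION & SPEC =====
def Spec_is_operator_allowed_path_py (path : String) (out : Bool) : Prop := out = is_operator_allowed_path_py_alt path
instance (path : String) (out : Bool) : Decidable (Spec_is_operator_allowed_path_py path out) := by unfold Spec_is_operator_allowed_path_py; infer_instance

-- ===== CLAIM (what is proved, stated in full; the proofs are below) =====
def Claim_equal_is_operator_allowed_path_py : Prop := ∀ (path : String), Dom_is_operator_allowed_path_py path → Spec_is_operator_allowed_path_py path (is_operator_allowed_path_py path)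

-- ===== LEMMAS AND PROOFS =====

-- if path does not start with "/ops/", it cannot equal a literal string that does
theorem ne_of_ops (path : String)
    (h : PySem.Chars.startswith path.toList ['/', 'o', 'p', 's', '/'] = false)
    (s : String) (hs : PySem.Chars.startswith s.toList ['/', 'o', 'p', 's', '/'] = true) :
    path ≠ s := by
  rintro rfl; rw [h] at hs; exact absurd hs (by simp)

-- if path starts with a longer "/ops/…" prefix, it starts with "/ops/"
theorem startswith_of_ops_prefix (path : String) (p : List Char)
    (h : PySem.Chars.startswith path.toList ['/', 'o', 'p', 's', '/'] = false)
    (hp : ['/', 'o', 'p', 's', '/'] <+: p) :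
    PySem.Chars.startswith path.toList p = false := by
  rw [Bool.eq_false_iff] at h ⊢
  intro hc
  exact h ((PySem.Chars.startswith_iff _ _).mpr (hp.trans ((PySem.Chars.startswith_iff _ _).mp hc)))

-- ===== VERDICT (by name: the statement is the Claim_ definition above) =====
theorem is_operator_allowed_path_py_spec : Claim_equal_is_operator_allowed_path_py := by
  intro path _
  show is_operator_allowed_path_py path = is_operator_allowed_path_py_alt path
  by_cases h : PySem.Chars.startswith path.toList ['/', 'o', 'p', 's', '/'] = true
  · simp [is_operator_allowed_path_py, is_actions_allowed_path_py,
      OPERATOR_EXTRA_PREFIXES, is_operator_allowed_path_py_alt, h]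
  · rw [Bool.not_eq_true] at h
    have e := ne_of_ops path h
    have t := startswith_of_ops_prefix path (h := h)
    simp [is_operator_allowed_path_py, is_actions_allowed_path_py,
      is_operator_allowed_path_py_alt, READ_ONLY_ACTIONS_PATHS,
      OPERATOR_EMERGENCY_PATHS, OPERATOR_EXTRA_PREFIXES, h,
      e "/ops/files/content" (by decide), e "/ops/files/tree" (by decide),
      e "/ops/files/search" (by decide), e "/ops/files/diff" (by decide),
      e "/ops/repos" (by decide), e "/ops/repos/active" (by decide),
      e "/ops/repos/select" (by decide), e "/ops/plan" (by decide),
      e "/ops/drafts" (by decide), e "/ops/approved" (by decide),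
      e "/ops/runs" (by decide), e "/ops/config" (by decide),
      e "/ops/security/events" (by decide), e "/ops/security/resolve" (by decide),
      e "/ops/repos/revoke" (by decide), e "/ops/audit/tail" (by decide),
      t ['/', 'o', 'p', 's', '/', 'd', 'r', 'a', 'f', 't', 's', '/'] (by decide),
      t ['/', 'o', 'p', 's', '/', 'a', 'p', 'p', 'r', 'o', 'v', 'e', 'd', '/'] (by decide),
      t ['/', 'o', 'p', 's', '/', 'r', 'u', 'n', 's', '/'] (by decide),
      Bool.or_assoc, beq_eq_decide]
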